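-- pv_equiv track=rewrite | github.com/0xVector/set-packing-sat | src/set-packing2.py | encode_disjoint
-- ===== SOURCE A (Python) =====
-- def encode_disjoint(n: int, subsets: list[list[int]]) -> list[list[int]]:
--     cnf = []
--     for u in range(n):
--         in_subsets = [i for i, s in enumerate(subsets) if u in s]
--         for i, a in enumerate(in_subsets):
--             for b in in_subsets[i + 1:]:  # skip self + duplicates
--                 clause = [-var_id(u, a), -var_id(u, b)]
--                 cnf.append(clause)
--     return cnf
--
-- def var_id(element: int, subset: int):
--     return element + subset*10
-- ===== SOURCE B (Python) =====
-- def encode_disjoint(n: int, subsets: list[list[int]]) -> list[list[int]]: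
--     index = {}
--     for i, s in enumerate(subsets):
--         for u in set(s):
--             if 0 <= u < n:
--                 index.setdefault(u, []).append(i)
--     cnf = []
--     for u in range(n):
--         occ = index.get(u, [])
--         for j, a in enumerate(occ):
--             for b in occ[j + 1:]:
--                 cnf.append([-(u + a * 10), -(u + b * 10)])
--     return cnf
-- ===== Notes on version B (the rewrite author's own statement) =====
-- stated objective: faster
-- what changed: A rescans every subset for every element u in range(n); B builds an element-to-subset-indices inverted index in one pass over the subsets and then only enumerates pairs per element.
import Mathlib
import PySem

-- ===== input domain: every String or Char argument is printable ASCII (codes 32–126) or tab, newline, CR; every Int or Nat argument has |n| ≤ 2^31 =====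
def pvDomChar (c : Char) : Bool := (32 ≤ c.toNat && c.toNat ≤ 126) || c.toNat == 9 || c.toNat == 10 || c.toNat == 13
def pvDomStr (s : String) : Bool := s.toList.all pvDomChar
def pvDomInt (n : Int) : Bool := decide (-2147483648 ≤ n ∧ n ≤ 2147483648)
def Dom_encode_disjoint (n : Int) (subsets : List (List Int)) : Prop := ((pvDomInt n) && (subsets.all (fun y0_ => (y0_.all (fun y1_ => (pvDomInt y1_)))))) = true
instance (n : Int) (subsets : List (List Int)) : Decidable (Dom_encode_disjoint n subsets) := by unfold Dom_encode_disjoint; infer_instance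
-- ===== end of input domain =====

-- B replaces A's per-element rescan of all subsets by an inverted index built in one
-- pass over the subsets (element -> subset indices); return value identical.

-- ===== PORT A =====
-- var_id(element, subset) = element + subset*10
def var_id (element : Int) (subset : Int) : Int := element + subset * 10

def encode_disjoint (n : Int) (subsets : List (List Int)) : List (List Int) :=
  (PySem.List.pyRange 0 n 1).foldl (fun cnf u =>
    let in_subsets :=
      (PySem.List.enumerate subsets).foldl
        (fun acc p => if u ∈ p.2 then acc ++ [p.1] else acc) []
    (PySem.List.enumerate in_subsets).foldl (fun cnf2 q =>
      (PySem.List.slice in_subsets (some (q.1 + 1)) none).foldl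
        (fun cnf3 b => cnf3 ++ [[-(var_id u q.2), -(var_id u b)]]) cnf2) cnf) []

-- ===== PORT B =====
-- 'for i, s in enumerate(subsets): for u in set(s): if 0 <= u < n: index.setdefault(u, []).append(i)'
-- (iterating the Python set is safe here: each key's list collects i once per subset,
--  in subset order, so the output never depends on the set's iteration order)
def edIndex (n : Int) (subsets : List (List Int)) : PySem.Dict Int (List Int) :=
  (PySem.List.enumerate subsets).foldl (fun d p =>
    (PySem.Set.ofList p.2).foldl (fun d u =>
      if decide (0 ≤ u) && decide (u < n) then d.modify u [] (· ++ [p.1]) else d) d)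
    PySem.Dict.empty

def encode_disjoint_alt (n : Int) (subsets : List (List Int)) : List (List Int) :=
  (PySem.List.pyRange 0 n 1).foldl (fun cnf u =>
    let occ := (edIndex n subsets).getD u []
    (PySem.List.enumerate occ).foldl (fun cnf2 q =>
      (PySem.List.slice occ (some (q.1 + 1)) none).foldl
        (fun cnf3 b => cnf3 ++ [[-(u + q.2 * 10), -(u + b * 10)]]) cnf2) cnf) []

-- ===== PRECONDITION & SPEC =====
def Spec_encode_disjoint (n : Int) (subsets : List (List Int)) (out : List (List Int)) : Prop := out = encode_disjoint_alt n subsets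
instance (n : Int) (subsets : List (List Int)) (out : List (List Int)) : Decidable (Spec_encode_disjoint n subsets out) := by unfold Spec_encode_disjoint; infer_instance

-- ===== CLAIM (what is proved, stated in full; the proofs are below) =====
def Claim_equal_encode_disjoint : Prop := ∀ (n : Int) (subsets : List (List Int)), Dom_encode_disjoint n subsets → Spec_encode_disjoint n subsets (encode_disjoint n subsets)

-- ===== LEMMAS AND PROOFS =====

-- a guarded fold is a fold over the filtered list
theorem foldl_if_filter {α β : Type} (c : α → Bool) (g : β → α → β) :
    ∀ (xs : List α) (d : β),
    xs.foldl (fun d u => if c u then g d u else d) d = (xs.filter c).foldl g d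
  | [], d => rfl
  | x :: rest, d => by
    by_cases h : c x <;> simp [h, foldl_if_filter c g rest]

-- B's index build is the flat-stream fold of Dict.modify
theorem edIndex_eq_stream (n : Int) (subsets : List (List Int)) :
    edIndex n subsets =
      ((PySem.List.enumerate subsets).flatMap (fun p =>
        ((PySem.Set.ofList p.2).filter (fun u => decide (0 ≤ u) && decide (u < n))).map
          (fun u => (u, p.1)))).foldl
        (fun d q => d.modify q.1 [] (· ++ [q.2])) PySem.Dict.empty := by
  unfold edIndex
  rw [List.foldl_flatMap]
  apply PySem.List.foldl_congr_mem
  intro d p _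
  rw [foldl_if_filter, List.foldl_map]

-- on a duplicate-free list, filtering for one key keeps exactly its occurrence
theorem filter_beq_of_nodup (u : Int) : ∀ (xs : List Int), xs.Nodup →
    xs.filter (fun v => v == u) = if u ∈ xs then [u] else []
  | [], _ => by simp
  | a :: rest, h => by
    by_cases hau : a = u
    · subst hau
      have hnot : a ∉ rest := (List.nodup_cons.1 h).1
      have hz : rest.filter (fun v => v == a) = [] :=
        List.filter_eq_nil_iff.2 (fun v hv hvu => hnot (by rwa [beq_iff_eq.1 hvu] at hv))
      simp [hz]
    · have := filter_beq_of_nodup u rest (List.nodup_cons.1 h).2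
      simp [hau, Ne.symm hau, this]

-- one subset's contribution to the stream, restricted to key u with 0 ≤ u < n
theorem edHead (n u i : Int) (h0 : 0 ≤ u) (h1 : u < n) (xs : List Int) :
    ((((((PySem.Set.ofList xs).filter (fun v => decide (0 ≤ v) && decide (v < n)))).map
        (fun v => (v, i))).filter (fun p => p.1 == u)).map (fun p => p.2))
    = if u ∈ xs then [i] else [] := by
  rw [List.filter_map, List.map_map]
  have hcomp : (((fun p => p.1 == u) : Int × Int → Bool) ∘ (fun v => (v, i)))
      = fun v => v == u := rfl
  rw [hcomp, List.filter_filter]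
  have hcong : ((PySem.Set.ofList xs).filter
      (fun a => (a == u) && (decide (0 ≤ a) && decide (a < n))))
      = (PySem.Set.ofList xs).filter (fun v => v == u) := by
    apply List.filter_congr
    intro a _
    by_cases hau : a = u
    · subst hau; simp [h0, h1]
    · simp [hau]
  rw [hcong, filter_beq_of_nodup u _ (PySem.Set.nodup_ofList xs)]
  by_cases hm : u ∈ xs <;> simp [PySem.Set.mem_ofList, hm]

-- A's accumulator loop as a flatMap
theorem foldA_flatMap (u : Int) : ∀ (l : List (Int × List Int)) (acc : List Int),
    l.foldl (fun acc p => if u ∈ p.2 then acc ++ [p.1] else acc) acc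
    = acc ++ l.flatMap (fun p => if u ∈ p.2 then [p.1] else [])
  | [], acc => by simp
  | p :: rest, acc => by
    by_cases h : u ∈ p.2 <;>
      simp [h, foldA_flatMap u rest, List.append_assoc]

-- the stream entries with key u are exactly the subsets containing u
theorem streamFilter (n u : Int) (h0 : 0 ≤ u) (h1 : u < n) : ∀ (l : List (Int × List Int)),
    (((l.flatMap (fun p => ((PySem.Set.ofList p.2).filter
        (fun v => decide (0 ≤ v) && decide (v < n))).map (fun v => (v, p.1)))).filter
      (fun p => p.1 == u)).map (fun p => p.2))
    = l.flatMap (fun p => if u ∈ p.2 then [p.1] else [])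
  | [] => by simp
  | p :: rest => by
    simp only [List.flatMap_cons, List.filter_append, List.map_append]
    rw [edHead n u p.1 h0 h1 p.2, streamFilter n u h0 h1 rest]

-- B's index lookup for 0 ≤ u < n equals A's in_subsets list
theorem edIndex_getD (n : Int) (subsets : List (List Int)) (u : Int)
    (h0 : 0 ≤ u) (h1 : u < n) :
    (edIndex n subsets).getD u []
      = (PySem.List.enumerate subsets).foldl
          (fun acc p => if u ∈ p.2 then acc ++ [p.1] else acc) [] := by
  rw [edIndex_eq_stream, PySem.Dict.getD_foldl_modify_append, foldA_flatMap,
    streamFilter n u h0 h1]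
  simp

-- ===== VERDICT (by name: the statement is the Claim_ definition above) =====
theorem encode_disjoint_spec : Claim_equal_encode_disjoint := by
  intro n subsets _
  unfold Spec_encode_disjoint encode_disjoint encode_disjoint_alt
  apply PySem.List.foldl_congr_mem
  intro cnf u hu
  have hu' := (PySem.List.mem_pyRange_one).1 hu
  rw [edIndex_getD n subsets u hu'.1 hu'.2]
  simp [var_id]
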